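-- pv_equiv track=rewrite | github.com/SCappella/riddler | 2020-05-22-states/states.py | longest_mackerel_num_letters
-- ===== SOURCE A (Python) =====
-- def mackerel_state(states, word):
--     mackerel_states = [state for state in states if not (set(state) & set(word))]
--     if len(mackerel_states) == 1:
--         return mackerel_states[0]
--
-- def longest_mackerel_num_letters(states, words):
--     # casefold words/states
--     states = [state.casefold() for state in states]
--     words = [word.casefold() for word in words]
--
--     words = sorted(words, key=lambda word: len(set(word)), reverse=True)
--
--     for word in words:
--         state = mackerel_state(states, word)
--         if state is not None:
--             return (word, state)
-- ===== SOURCE B (Python) =====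
-- def mackerel_state(states, word):
--     mackerel_states = [state for state in states if not (set(state) & set(word))]
--     if len(mackerel_states) == 1:
--         return mackerel_states[0]
--
-- def longest_mackerel_num_letters(states, words):
--     states = [state.casefold() for state in states]
--     candidates = []
--     for word in words:
--         word = word.casefold()
--         state = mackerel_state(states, word)
--         if state is not None:
--             candidates.append((word, state))
--     if not candidates:
--         return None
--     return max(candidates, key=lambda pair: len(set(pair[0])))
-- ===== Notes on version B (the rewrite author's own statement) =====
-- stated objective: alternative
-- what changed: Drops the stable descending sort entirely: B scans words in original order, collects every (word, state) candidate, and picks the first candidate maximizing distinct-letter count with max(), which matches A's sort-then-first-hit choice including ties.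
import Mathlib
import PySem

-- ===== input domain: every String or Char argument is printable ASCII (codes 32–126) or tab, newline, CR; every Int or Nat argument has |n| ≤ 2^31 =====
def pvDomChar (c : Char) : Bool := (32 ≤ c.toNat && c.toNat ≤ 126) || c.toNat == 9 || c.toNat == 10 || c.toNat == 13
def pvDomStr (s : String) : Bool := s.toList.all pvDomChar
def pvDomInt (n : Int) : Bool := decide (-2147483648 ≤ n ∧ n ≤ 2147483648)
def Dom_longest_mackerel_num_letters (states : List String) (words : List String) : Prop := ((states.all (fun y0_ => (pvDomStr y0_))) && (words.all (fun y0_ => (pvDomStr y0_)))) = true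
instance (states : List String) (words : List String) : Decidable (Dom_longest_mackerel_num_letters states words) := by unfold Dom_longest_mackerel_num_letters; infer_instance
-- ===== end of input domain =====

-- B drops A's stable descending sort: it collects candidates in original order and takes the
-- first distinct-letter-count maximum with max(); same value, no sort (objective: alternative).


-- ===== PORT A =====
-- helper mackerel_state (Source B keeps it verbatim, so both ports share it):
-- 'not (set(state) & set(word))' is emptiness of the character-set intersection
def mackerel_state (states : List String) (word : String) : Option String :=
  let mackerel_states := states.filter (fun state =>
    (PySem.Set.inter (PySem.Set.ofList state.toList) (PySem.Set.ofList word.toList)).isEmpty)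
  if mackerel_states.length = 1 then mackerel_states[0]? else none

-- A's 'for word in words: … return (word, state)' loop
def lmLoop (states : List String) : List String → Option (String × String)
  | [] => none
  | word :: rest =>
    match mackerel_state states word with
    | some state => some (word, state)
    | none => lmLoop states rest

-- str.casefold() = PySem.Str.lower, exact on the printable-ASCII domain
def longest_mackerel_num_letters (states : List String) (words : List String) :
    Option (String × String) :=
  let states := states.map PySem.Str.lower
  let words := words.map PySem.Str.lower
  let words := PySem.List.sorted words (fun word => (PySem.Set.ofList word.toList).length) true
  lmLoop states words

-- ===== PORT B =====
def longest_mackerel_num_letters_alt (states : List String) (words : List String) :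
    Option (String × String) :=
  let states := states.map PySem.Str.lower
  let candidates := words.foldl (fun acc word =>
    let word := PySem.Str.lower word
    match mackerel_state states word with
    | some state => acc ++ [(word, state)]
    | none => acc) []
  if candidates.isEmpty then none
  else PySem.List.max? candidates (fun pair => (PySem.Set.ofList pair.1.toList).length)

-- ===== PRECONDITION & SPEC =====
def Spec_longest_mackerel_num_letters (states : List String) (words : List String) (out : Option (String × String)) : Prop := out = longest_mackerel_num_letters_alt states words
instance (states : List String) (words : List String) (out : Option (String × String)) : Decidable (Spec_longest_mackerel_num_letters states words out) := by unfold Spec_longest_mackerel_num_letters; infer_instance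

-- ===== CLAIM (what is proved, stated in full; the proofs are below) =====
def Claim_equal_longest_mackerel_num_letters : Prop := ∀ (states : List String) (words : List String), Dom_longest_mackerel_num_letters states words → Spec_longest_mackerel_num_letters states words (longest_mackerel_num_letters states words)

-- ===== LEMMAS AND PROOFS =====

-- A's loop is head-of-filterMap of the candidate map
theorem lmLoop_eq_head_filterMap (states : List String) (l : List String) :
    lmLoop states l =
      (l.filterMap (fun w => (mackerel_state states w).map (fun s => (w, s)))).head? := by
  induction l with
  | nil => rfl
  | cons w rest ih =>
    simp only [lmLoop, List.filterMap_cons]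
    cases h : mackerel_state states w <;> simp [h, ih]

-- inserting an element whose key beats every element goes to the head
theorem insertBy_of_head_lt {β : Type} (kβ : β → Nat) (b : β) (l : List β)
    (h : ∀ c ∈ l, kβ c < kβ b) :
    PySem.List.insertBy (fun c d => decide (kβ d < kβ c)) b l = b :: l := by
  cases l with
  | nil => rfl
  | cons c t => simp [PySem.List.insertBy, h c (by simp)]

-- key-preserving filterMap commutes with one stable descending insertion
theorem filterMap_insertBy {α β : Type} (kα : α → Nat) (kβ : β → Nat) (f : α → Option β)
    (hf : ∀ a b, f a = some b → kβ b = kα a) (x : α) :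
    ∀ (l : List α), l.Pairwise (fun a b => kα b ≤ kα a) →
    (PySem.List.insertBy (fun a b => decide (kα b < kα a)) x l).filterMap f =
      (match f x with
       | none => l.filterMap f
       | some b => PySem.List.insertBy (fun c d => decide (kβ d < kβ c)) b (l.filterMap f)) := by
  intro l
  induction l with
  | nil =>
    intro _
    cases h : f x <;> simp [PySem.List.insertBy, List.filterMap_cons, h]
  | cons y ys ih =>
    intro hp
    obtain ⟨hpHead, hpTail⟩ := List.pairwise_cons.mp hp
    by_cases hxy : kα y < kα x
    · -- x is inserted at the head
      cases hx : f x with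
      | none => cases hy : f y <;> simp [PySem.List.insertBy, hxy, List.filterMap_cons, hx, hy]
      | some b =>
        have hkb : kβ b = kα x := hf _ _ hx
        cases hy : f y with
        | some c =>
          have hkc : kβ c = kα y := hf _ _ hy
          have hins := insertBy_of_head_lt kβ b (c :: ys.filterMap f) (by
            intro e he
            rcases List.mem_cons.mp he with rfl | he
            · omega
            · rcases List.mem_filterMap.mp he with ⟨z, hz, hfz⟩
              have := hf _ _ hfz
              have := hpHead z hz
              omega)
          simp [PySem.List.insertBy, hxy, List.filterMap_cons, hx, hy, hins]
        | none =>
          have hins := insertBy_of_head_lt kβ b (ys.filterMap f) (by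
            intro e he
            rcases List.mem_filterMap.mp he with ⟨z, hz, hfz⟩
            have := hf _ _ hfz
            have := hpHead z hz
            omega)
          simp [PySem.List.insertBy, hxy, List.filterMap_cons, hx, hy, hins]
    · -- x is inserted further down: recurse
      have hrec := ih hpTail
      cases hx : f x with
      | none =>
        rw [hx] at hrec
        cases hy : f y <;> simp [PySem.List.insertBy, hxy, List.filterMap_cons, hy, hrec]
      | some b =>
        have hkb : kβ b = kα x := hf _ _ hx
        rw [hx] at hrec
        cases hy : f y with
        | some c =>
          have hkc : kβ c = kα y := hf _ _ hy
          have hnc : ¬ (kβ c < kβ b) := by omega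
          simp [PySem.List.insertBy, hxy, List.filterMap_cons, hy, hnc, hrec]
        | none =>
          simp [PySem.List.insertBy, hxy, List.filterMap_cons, hy, hrec]

theorem sorted_rev_append_singleton {α κ : Type} [LinearOrder κ] (ys : List α) (x : α)
    (key : α → κ) :
    PySem.List.sorted (ys ++ [x]) key true =
      PySem.List.insertBy (fun a b => decide (key b < key a)) x
        (PySem.List.sorted ys key true) := by
  rw [PySem.List.sorted_rev_eq_foldl_insertBy, PySem.List.sorted_rev_eq_foldl_insertBy,
    List.foldl_append]
  rfl

theorem max?_append_singleton {β : Type} (key : β → Nat) (ys : List β) (x : β) :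
    PySem.List.max? (ys ++ [x]) key =
      (match PySem.List.max? ys key with
       | none => some x
       | some m => if key m < key x then some x else some m) := by
  unfold PySem.List.max?
  rw [List.foldl_append]
  rfl

-- key-preserving filterMap commutes with the whole stable descending sort
theorem filterMap_sorted_rev {α β : Type} (kα : α → Nat) (kβ : β → Nat) (f : α → Option β)
    (hf : ∀ a b, f a = some b → kβ b = kα a) (ws : List α) :
    (PySem.List.sorted ws kα true).filterMap f =
      PySem.List.sorted (ws.filterMap f) kβ true := by
  induction ws using List.reverseRecOn with
  | nil => rfl
  | append_singleton ys x ih =>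
    rw [sorted_rev_append_singleton,
      filterMap_insertBy kα kβ f hf x _ (PySem.List.sorted_pairwise_rev _ _),
      List.filterMap_append, ih]
    cases hx : f x with
    | none => simp [List.filterMap_cons, hx]
    | some b => simp [List.filterMap_cons, hx, sorted_rev_append_singleton]

theorem head?_insertBy {β : Type} (before : β → β → Bool) (x : β) (l : List β) :
    (PySem.List.insertBy before x l).head? =
      (match l with
       | [] => some x
       | m :: _ => if before x m then some x else some m) := by
  cases l with
  | nil => rfl
  | cons m t =>
    by_cases h : before x m = true <;> simp [PySem.List.insertBy, h]

-- the head of a stable descending sort is Python's max (first maximal element)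
theorem head_sorted_rev_eq_max? {β : Type} (kβ : β → Nat) (ys : List β) :
    (PySem.List.sorted ys kβ true).head? = PySem.List.max? ys kβ := by
  induction ys using List.reverseRecOn with
  | nil => rfl
  | append_singleton ys x ih =>
    rw [sorted_rev_append_singleton, head?_insertBy, max?_append_singleton, ← ih]
    cases hs : PySem.List.sorted ys kβ true <;> simp

-- B's append loop builds exactly the candidate filterMap
theorem foldl_cands (states : List String) (l : List String)
    (acc : List (String × String)) :
    l.foldl (fun acc word =>
        let word := PySem.Str.lower word
        match mackerel_state states word with
        | some state => acc ++ [(word, state)]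
        | none => acc) acc =
      acc ++ l.filterMap (fun w =>
        (mackerel_state states (PySem.Str.lower w)).map (fun s => (PySem.Str.lower w, s))) := by
  induction l generalizing acc with
  | nil => simp
  | cons w rest ih =>
    simp only [List.foldl_cons, List.filterMap_cons]
    cases h : mackerel_state states (PySem.Str.lower w) <;> simp [h, ih]

-- ===== VERDICT (by name: the statement is the Claim_ definition above) =====
theorem longest_mackerel_num_letters_spec : Claim_equal_longest_mackerel_num_letters := by
  unfold Claim_equal_longest_mackerel_num_letters
  intro states words _
  unfold Spec_longest_mackerel_num_letters
  unfold longest_mackerel_num_letters longest_mackerel_num_letters_alt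
  simp only
  rw [lmLoop_eq_head_filterMap, foldl_cands,
    filterMap_sorted_rev (fun w => (PySem.Set.ofList w.toList).length)
      (fun p => (PySem.Set.ofList p.1.toList).length)
      (fun w => (mackerel_state (states.map PySem.Str.lower) w).map (fun s => (w, s)))
      (by
        intro a b h
        simp only [Option.map_eq_some_iff] at h
        obtain ⟨s, hs, rfl⟩ := h
        rfl),
    List.filterMap_map, head_sorted_rev_eq_max?]
  simp only [List.nil_append]
  have hfm : words.filterMap
      ((fun w => (mackerel_state (states.map PySem.Str.lower) w).map (fun s => (w, s))) ∘
        PySem.Str.lower) =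
      words.filterMap (fun w =>
        (mackerel_state (states.map PySem.Str.lower) (PySem.Str.lower w)).map
          (fun s => (PySem.Str.lower w, s))) := rfl
  rw [hfm]
  cases h : words.filterMap (fun w =>
      (mackerel_state (states.map PySem.Str.lower) (PySem.Str.lower w)).map
        (fun s => (PySem.Str.lower w, s))) <;> simp
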